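-- pv_equiv track=rewrite | github.com/zhu04303661/OpenAspen | flowsheet_solver/solver.py | _process_dependency_lists
-- ===== SOURCE A (Python) =====
-- from typing import Dict, List, Set, Tuple, Optional, Any, Callable, Union
--
-- def _process_dependency_lists(lists: Dict[int, List[str]]) -> Tuple[List[str], Dict[int, List[str]]]:
--     """
--     处理依赖关系列表
--
--     将层次化的依赖关系转换为最终的计算顺序，去除重复对象。
--
--     Args:
--         lists: 层次字典
--
--     Returns:
--         Tuple: (对象栈, 过滤后的层次字典)
--     """
--     obj_stack = []
--     filtered_list = {}
--
--     # 获取最大层次索引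
--     max_idx = max(lists.keys()) if lists else -1
--
--     # 反向处理列表（从最内层到最外层）
--     for list_idx in range(max_idx, -1, -1):
--         if list_idx in lists:
--             filtered_list[max_idx - list_idx] = lists[list_idx].copy()
--
--             # 添加到对象栈，去除重复
--             for obj_name in lists[list_idx]:
--                 if obj_name not in obj_stack:
--                     obj_stack.append(obj_name)
--                 else:
--                     # 从过滤列表中移除重复对象
--                     filtered_list[max_idx - list_idx].remove(obj_name)
--
--     return obj_stack, filtered_list
-- ===== SOURCE B (Python) =====
-- def _process_dependency_lists(lists):
--     """Single-pass per layer: a 'seen' set replaces the repeated stack scans, and each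
--     layer's filtered entry is built directly as its last-occurrence new objects (reverse
--     sweep with a per-layer set), instead of copying the layer and calling .remove per duplicate."""
--     obj_stack = []
--     seen = set()
--     filtered_list = {}
--     max_idx = max(lists.keys()) if lists else -1
--     for idx in range(max_idx, -1, -1):
--         if idx in lists:
--             layer = lists[idx]
--             kept = []
--             layer_seen = set()
--             for x in reversed(layer):
--                 if x not in layer_seen:
--                     layer_seen.add(x)
--                     if x not in seen:
--                         kept.append(x)
--             kept.reverse()
--             filtered_list[max_idx - idx] = kept
--             for x in layer:
--                 if x not in seen:
--                     seen.add(x)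
--                     obj_stack.append(x)
--     return obj_stack, filtered_list
-- ===== Notes on version B (the rewrite author's own statement) =====
-- stated objective: faster
-- what changed: A scans the whole obj_stack per object and builds each layer's filtered entry by copying it and calling .remove per duplicate; B keeps a seen-set for O(1) membership and builds each filtered entry directly in one reverse sweep that keeps the layer's last-occurrence new objects, never touching the list again.
import Mathlib
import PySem

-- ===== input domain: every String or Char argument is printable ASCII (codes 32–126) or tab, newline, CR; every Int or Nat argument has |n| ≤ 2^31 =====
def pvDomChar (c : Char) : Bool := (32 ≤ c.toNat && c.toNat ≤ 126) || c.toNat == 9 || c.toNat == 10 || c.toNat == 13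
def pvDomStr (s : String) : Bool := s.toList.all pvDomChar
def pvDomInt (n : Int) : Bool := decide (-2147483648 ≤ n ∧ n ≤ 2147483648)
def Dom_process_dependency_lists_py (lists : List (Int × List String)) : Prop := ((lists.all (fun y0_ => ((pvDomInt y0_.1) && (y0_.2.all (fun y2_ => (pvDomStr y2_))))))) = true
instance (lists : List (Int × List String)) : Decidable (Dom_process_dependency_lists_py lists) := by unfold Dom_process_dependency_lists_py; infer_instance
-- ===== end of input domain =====

-- B replaces A's per-object stack scan and copy-then-.remove dedup by a seen-set and a
-- per-layer reverse sweep that keeps each layer's last-occurrence new objects directly.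

-- ===== PORT A =====
-- the dict argument, as Python receives it (assoc list → dict: later duplicate keys overwrite)
def process_dependency_lists_py (lists : List (Int × List String)) : List String × (List (Int × List String)) :=
  let d : PySem.Dict Int (List String) := PySem.Dict.ofList lists
  -- max_idx = max(lists.keys()) if lists else -1
  let max_idx : Int :=
    match PySem.List.max? d.keys (fun k => k) with
    | some m => m
    | none => -1
  let r := (PySem.List.pyRange max_idx (-1) (-1)).foldl
    (fun (s : List String × PySem.Dict Int (List String)) list_idx =>
      match d.get? list_idx with
      | some vals =>
        -- filtered_list[max_idx - list_idx] = lists[list_idx].copy(), then the inner loop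
        vals.foldl
          (fun (t : List String × PySem.Dict Int (List String)) obj =>
            if obj ∈ t.1 then
              -- filtered_list[max_idx - list_idx].remove(obj); the element is always present
              -- here so Python's .remove never raises; none keeps the list (unreachable)
              (t.1, t.2.modify (max_idx - list_idx) []
                (fun l => (PySem.List.remove? l obj).getD l))
            else
              (t.1 ++ [obj], t.2))
          (s.1, s.2.insert (max_idx - list_idx) vals)
      | none => s)
    ([], PySem.Dict.empty)
  (r.1, r.2.items)

-- ===== PORT B =====
def process_dependency_lists_py_alt (lists : List (Int × List String)) : List String × (List (Int × List String)) :=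
  let d : PySem.Dict Int (List String) := PySem.Dict.ofList lists
  let max_idx : Int :=
    match PySem.List.max? d.keys (fun k => k) with
    | some m => m
    | none => -1
  let r := (PySem.List.pyRange max_idx (-1) (-1)).foldl
    (fun (s : List String × PySem.Set String × PySem.Dict Int (List String)) idx =>
      match d.get? idx with
      | some layer =>
        -- reverse sweep: kept = last-occurrence objects of the layer not seen before it
        let z := layer.reverse.foldl
          (fun (t : PySem.Set String × List String) x =>
            if PySem.Set.contains t.1 x then t
            else (PySem.Set.add t.1 x,
                  if PySem.Set.contains s.2.1 x then t.2 else t.2 ++ [x]))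
          (PySem.Set.empty, [])
        let kept := z.2.reverse
        let s' : List String × PySem.Set String × PySem.Dict Int (List String) :=
          (s.1, s.2.1, s.2.2.insert (max_idx - idx) kept)
        -- stack loop: append each newly seen object
        layer.foldl
          (fun (u : List String × PySem.Set String × PySem.Dict Int (List String)) x =>
            if PySem.Set.contains u.2.1 x then u
            else (u.1 ++ [x], PySem.Set.add u.2.1 x, u.2.2))
          s'
      | none => s)
    ([], PySem.Set.empty, PySem.Dict.empty)
  (r.1, r.2.2.items)

-- ===== PRECONDITION & SPEC =====
def Spec_process_dependency_lists_py (lists : List (Int × List String)) (out : List String × (List (Int × List String))) : Prop := out = process_dependency_lists_py_alt lists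
instance (lists : List (Int × List String)) (out : List String × (List (Int × List String))) : Decidable (Spec_process_dependency_lists_py lists out) := by unfold Spec_process_dependency_lists_py; infer_instance

-- ===== CLAIM (what is proved, stated in full; the proofs are below) =====
def Claim_equal_process_dependency_lists_py : Prop := ∀ (lists : List (Int × List String)), Dom_process_dependency_lists_py lists → Spec_process_dependency_lists_py lists (process_dependency_lists_py lists)

-- ===== LEMMAS AND PROOFS =====

-- `.remove` on a list, with the list kept when the element is absent, is `List.erase`
theorem pvRm_eq_erase (l : List String) (v : String) :
    (PySem.List.remove? l v).getD l = l.erase v := by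
  by_cases h : v ∈ l
  · rw [PySem.List.remove?_eq_some_erase l v h]; rfl
  · rw [(PySem.List.remove?_eq_none_iff l v).2 h, List.erase_of_not_mem h]; rfl

-- A's inner loop with the dict carried along = the pure pair loop, dict written once
def pvPairStep (t : List String × List String) (obj : String) : List String × List String :=
  if obj ∈ t.1 then (t.1, t.2.erase obj) else (t.1 ++ [obj], t.2)

theorem pvDictFold (vals : List String) (key : Int) (d : PySem.Dict Int (List String)) :
    ∀ (st cur : List String),
    vals.foldl
      (fun (t : List String × PySem.Dict Int (List String)) obj =>
        if obj ∈ t.1 then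
          (t.1, t.2.modify key [] (fun l => (PySem.List.remove? l obj).getD l))
        else (t.1 ++ [obj], t.2))
      (st, d.insert key cur)
    = ((vals.foldl pvPairStep (st, cur)).1,
       d.insert key (vals.foldl pvPairStep (st, cur)).2) := by
  induction vals with
  | nil => intro st cur; rfl
  | cons x r ih =>
    intro st cur
    have h1 : (PySem.Dict.insert d key cur).modify key []
        (fun l => (PySem.List.remove? l x).getD l) = d.insert key (cur.erase x) := by
      rw [PySem.Dict.modify, PySem.Dict.getD_insert_self, PySem.Dict.insert_insert_self,
        pvRm_eq_erase]
    have h2 : pvPairStep (st, cur) x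
        = if x ∈ st then (st, cur.erase x) else (st ++ [x], cur) := rfl
    simp only [List.foldl_cons, h2]
    by_cases hx : x ∈ st
    · simp only [if_pos hx, h1]
      exact ih st (cur.erase x)
    · simp only [if_neg hx]
      exact ih (st ++ [x]) cur

-- the stack loop alone
def pvStF (vals st : List String) : List String :=
  vals.foldl (fun s x => if x ∈ s then s else s ++ [x]) st

-- the per-layer filtered entry, as a move-to-back fold over the new objects
def pvR (st0 : List String) (vals : List String) : List String :=
  vals.foldl (fun c x => if x ∈ st0 then c else c.erase x ++ [x]) []

-- characterisation of A's pair loop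
theorem pvPairFold_spec (vals : List String) : ∀ (st0 st C : List String),
    C.Nodup → (∀ x, x ∈ C ↔ x ∈ st ∧ x ∉ st0) → (∀ x ∈ st0, x ∈ st) →
    vals.foldl pvPairStep (st, C ++ vals)
    = (pvStF vals st, vals.foldl (fun c x => if x ∈ st0 then c else c.erase x ++ [x]) C) := by
  induction vals with
  | nil => intro st0 st C _ _ _; simp [pvStF]
  | cons x r ih =>
    intro st0 st C hnd hC hsub
    rw [List.foldl_cons, List.foldl_cons]
    have hstf : pvStF (x :: r) st = pvStF r (if x ∈ st then st else st ++ [x]) := by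
      simp only [pvStF, List.foldl_cons]
    by_cases hst : x ∈ st
    · have hstep : pvPairStep (st, C ++ x :: r) x = (st, (C ++ x :: r).erase x) := by
        simp [pvPairStep, hst]
      rw [hstep]
      by_cases hst0 : x ∈ st0
      · have hxC : x ∉ C := fun hc => ((hC x).1 hc).2 hst0
        have he : (C ++ x :: r).erase x = C ++ r := by
          rw [List.erase_append_right _ hxC, List.erase_cons_head]
        rw [he, if_pos hst0, ih st0 st C hnd hC hsub, hstf, if_pos hst]
      · have hxC : x ∈ C := (hC x).2 ⟨hst, hst0⟩
        have he : (C ++ x :: r).erase x = (C.erase x ++ [x]) ++ r := by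
          rw [List.erase_append_left _ hxC, List.append_assoc, List.singleton_append]
        have hnd' : (C.erase x ++ [x]).Nodup := by
          rw [List.nodup_append]
          refine ⟨hnd.erase x, List.nodup_singleton x, ?_⟩
          intro a ha b hb
          rw [List.mem_singleton] at hb
          subst hb
          exact ((hnd.mem_erase_iff).1 ha).1
        have hC' : ∀ y, y ∈ C.erase x ++ [x] ↔ y ∈ st ∧ y ∉ st0 := by
          intro y
          rw [List.mem_append, List.mem_singleton, hnd.mem_erase_iff]
          constructor
          · rintro (⟨_, hyC⟩ | rfl)
            · exact (hC y).1 hyC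
            · exact ⟨hst, hst0⟩
          · intro hy
            by_cases hyx : y = x
            · exact Or.inr hyx
            · exact Or.inl ⟨hyx, (hC y).2 hy⟩
        rw [he, if_neg hst0, ih st0 st (C.erase x ++ [x]) hnd' hC' hsub, hstf, if_pos hst]
    · have hstep : pvPairStep (st, C ++ x :: r) x = (st ++ [x], C ++ x :: r) := by
        simp [pvPairStep, hst]
      have hst0 : x ∉ st0 := fun h => hst (hsub x h)
      have hxC : x ∉ C := fun hc => hst ((hC x).1 hc).1
      have he : C ++ x :: r = (C ++ [x]) ++ r := by
        rw [List.append_assoc, List.singleton_append]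
      have hnd' : (C ++ [x]).Nodup := by
        rw [List.nodup_append]
        refine ⟨hnd, List.nodup_singleton x, ?_⟩
        intro a ha b hb
        rw [List.mem_singleton] at hb
        subst hb
        exact fun h => hxC (h ▸ ha)
      have hC' : ∀ y, y ∈ C ++ [x] ↔ y ∈ st ++ [x] ∧ y ∉ st0 := by
        intro y
        rw [List.mem_append, List.mem_singleton, List.mem_append, List.mem_singleton]
        constructor
        · rintro (hyC | rfl)
          · obtain ⟨h1, h2⟩ := (hC y).1 hyC
            exact ⟨Or.inl h1, h2⟩
          · exact ⟨Or.inr rfl, hst0⟩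
        · rintro ⟨h1 | rfl, h2⟩
          · exact Or.inl ((hC y).2 ⟨h1, h2⟩)
          · exact Or.inr rfl
      have hsub' : ∀ y ∈ st0, y ∈ st ++ [x] := by
        intro y hy
        rw [List.mem_append]
        exact Or.inl (hsub y hy)
      rw [hstep, he, ih st0 (st ++ [x]) (C ++ [x]) hnd' hC' hsub', hstf, if_neg hst,
        if_neg hst0, List.erase_of_not_mem hxC]

-- first-occurrence dedup relative to a seen list
def pvDed (s : List String) : List String → List String
  | [] => []
  | x :: r => if x ∈ s then pvDed s r else x :: pvDed (s ++ [x]) r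

theorem pvDed_congr (l : List String) : ∀ (s₁ s₂ : List String),
    (∀ y, y ∈ s₁ ↔ y ∈ s₂) → pvDed s₁ l = pvDed s₂ l := by
  induction l with
  | nil => intro _ _ _; rfl
  | cons x r ih =>
    intro s₁ s₂ h
    simp only [pvDed]
    by_cases hx : x ∈ s₁
    · rw [if_pos hx, if_pos ((h x).1 hx)]; exact ih _ _ h
    · rw [if_neg hx, if_neg (fun c => hx ((h x).2 c))]
      rw [ih (s₁ ++ [x]) (s₂ ++ [x]) (by intro y; simp [h y])]

theorem pvMem_ded (l : List String) : ∀ (s : List String) (y : String),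
    y ∈ pvDed s l ↔ y ∈ l ∧ y ∉ s := by
  induction l with
  | nil => intro s y; simp [pvDed]
  | cons x r ih =>
    intro s y
    simp only [pvDed]
    by_cases hx : x ∈ s
    · rw [if_pos hx, ih]
      simp only [List.mem_cons]
      by_cases hyx : y = x <;> simp [hyx, hx]
    · rw [if_neg hx]
      simp only [List.mem_cons, ih, List.mem_append]
      by_cases hyx : y = x <;> simp [hyx, hx]

theorem pvNodup_ded (l : List String) : ∀ (s : List String), (pvDed s l).Nodup := by
  induction l with
  | nil => intro s; simp [pvDed]
  | cons x r ih =>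
    intro s
    simp only [pvDed]
    by_cases hx : x ∈ s
    · rw [if_pos hx]; exact ih s
    · rw [if_neg hx]
      refine List.Nodup.cons ?_ (ih (s ++ [x]))
      intro hmem
      exact ((pvMem_ded r (s ++ [x]) x).1 hmem).2 (by simp)

theorem pvDed_filter_congr (p : String → Bool) (l : List String) : ∀ (s₁ s₂ : List String),
    (∀ y, p y = true → (y ∈ s₁ ↔ y ∈ s₂)) →
    (pvDed s₁ l).filter p = (pvDed s₂ l).filter p := by
  induction l with
  | nil => intro _ _ _; rfl
  | cons x r ih =>
    intro s₁ s₂ h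
    have hstep : ∀ (s t : List String), (∀ y, p y = true → (y ∈ s ↔ y ∈ t)) →
        ∀ y, p y = true → (y ∈ s ++ [x] ↔ y ∈ t ++ [x]) := by
      intro s t hh y hy; simp [hh y hy]
    by_cases hpx : p x = true
    · -- x survives the filter: the two sides must agree on it
      simp only [pvDed]
      by_cases h1 : x ∈ s₁
      · rw [if_pos h1, if_pos ((h x hpx).1 h1)]; exact ih _ _ h
      · rw [if_neg h1, if_neg (fun c => h1 ((h x hpx).2 c))]
        simp only [List.filter_cons, hpx]
        rw [ih _ _ (hstep _ _ h)]
    · -- x is filtered away: the seen lists may disagree on it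
      simp only [pvDed]
      by_cases h1 : x ∈ s₁ <;> by_cases h2 : x ∈ s₂
      · rw [if_pos h1, if_pos h2]; exact ih _ _ h
      · rw [if_pos h1, if_neg h2]
        simp only [List.filter_cons, hpx]
        simp only [Bool.false_eq_true, if_false]
        rw [ih s₁ (s₂ ++ [x]) (by intro y hy; simp [h y hy]; intro hyx; rw [hyx] at hy; exact absurd hy hpx)]
      · rw [if_neg h1, if_pos h2]
        simp only [List.filter_cons, hpx]
        simp only [Bool.false_eq_true, if_false]
        rw [ih (s₁ ++ [x]) s₂ (by intro y hy; simp [h y hy]; intro hyx; rw [hyx] at hy; exact absurd hy hpx)]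
      · rw [if_neg h1, if_neg h2]
        simp only [List.filter_cons, hpx]
        simp only [Bool.false_eq_true, if_false]
        rw [ih _ _ (hstep _ _ h)]

theorem pvDed_filter (p : String → Bool) (l : List String) : ∀ (s : List String),
    (pvDed s l).filter p = pvDed s (l.filter p) := by
  induction l with
  | nil => intro _; rfl
  | cons x r ih =>
    intro s
    by_cases hpx : p x = true
    · by_cases h1 : x ∈ s
      · simp only [pvDed, if_pos h1, List.filter_cons, hpx, if_true]
        exact ih s
      · simp only [pvDed, if_neg h1, List.filter_cons, hpx, if_true]
        rw [ih]
    · by_cases h1 : x ∈ s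
      · simp only [pvDed, if_pos h1, List.filter_cons]
        rw [if_neg hpx]
        exact ih s

      · simp only [pvDed, if_neg h1, List.filter_cons]
        rw [if_neg hpx, if_neg hpx]
        rw [pvDed_filter_congr p r (s ++ [x]) s
          (by intro y hy; simp; intro hyx; rw [hyx] at hy; exact absurd hy hpx), ih]

theorem pvDed_snoc_seen (x : String) (l : List String) : ∀ (s : List String),
    pvDed (s ++ [x]) l = (pvDed s l).erase x := by
  induction l with
  | nil => intro _; rfl
  | cons y r ih =>
    intro s
    by_cases hyx : y = x
    · subst hyx
      simp only [pvDed]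
      by_cases h1 : y ∈ s
      · rw [if_pos (by simp [h1]), if_pos h1, ih]
      · rw [if_pos (by simp), if_neg h1, List.erase_cons_head]
    · simp only [pvDed]
      by_cases h1 : y ∈ s
      · rw [if_pos (by simp [h1]), if_pos h1, ih]
      · rw [if_neg (by simp [h1, hyx]), if_neg h1,
          List.erase_cons_tail (by simp [hyx]),
          pvDed_congr r (s ++ [x] ++ [y]) (s ++ [y] ++ [x]) (by intro z; simp; tauto), ih]

theorem pvErase_reverse (l : List String) (x : String) (h : l.Nodup) :
    l.reverse.erase x = (l.erase x).reverse := by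
  rw [List.Nodup.erase_eq_filter (List.nodup_reverse.2 h), List.Nodup.erase_eq_filter h,
    List.filter_reverse]

-- the move-to-back fold builds the reverse-dedup of the reversed list
theorem pvR_eq_ded (w : List String) :
    w.foldl (fun c x => c.erase x ++ [x]) [] = (pvDed [] w.reverse).reverse := by
  induction w using List.reverseRecOn with
  | nil => rfl
  | append_singleton r x ih =>
    rw [List.foldl_append, List.foldl_cons, List.foldl_nil, ih, List.reverse_append]
    simp only [List.reverse_cons, List.reverse_nil, List.nil_append, List.singleton_append]
    simp only [pvDed, List.not_mem_nil, if_false]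
    rw [pvDed_snoc_seen x r.reverse []]
    rw [List.reverse_cons, pvErase_reverse _ _ (pvNodup_ded r.reverse [])]

theorem pvR_spec (st0 vals : List String) :
    pvR st0 vals = ((pvDed [] vals.reverse).filter (fun x => !PySem.Set.contains st0 x)).reverse := by
  unfold pvR
  rw [show (fun (c : List String) x => if x ∈ st0 then c else c.erase x ++ [x])
      = (fun c x => if x ∉ st0 then c.erase x ++ [x] else c) from by
        funext c x; rw [ite_not]]
  rw [PySem.List.foldl_ite_eq_foldl_filter (p := fun x => x ∉ st0)
    (f := fun (c : List String) x => c.erase x ++ [x])]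
  have hf : (fun x => decide (x ∉ st0)) = (fun x => !PySem.Set.contains st0 x) := by
    funext x
    by_cases hm : x ∈ st0
    · simp [PySem.Set.contains, hm]
    · simp [PySem.Set.contains, hm]
  rw [hf, pvR_eq_ded, pvDed_filter, List.filter_reverse]

-- B's reverse sweep computes exactly that dedup-and-filter
theorem pvRevSweep (seen0 : PySem.Set String) (l : List String) : ∀ (s : PySem.Set String) (k : List String),
    (l.foldl
      (fun (t : PySem.Set String × List String) x =>
        if PySem.Set.contains t.1 x then t
        else (PySem.Set.add t.1 x,
              if PySem.Set.contains seen0 x then t.2 else t.2 ++ [x]))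
      (s, k)).2
    = k ++ (pvDed s l).filter (fun x => !PySem.Set.contains seen0 x) := by
  induction l with
  | nil => intro s k; simp [pvDed]
  | cons x r ih =>
    intro s k
    rw [List.foldl_cons]
    by_cases hx : x ∈ s
    · have hc : PySem.Set.contains s x = true := by
        simp [PySem.Set.contains, hx]
      simp only [hc, if_true]
      rw [ih s k]
      simp only [pvDed, if_pos hx]
    · have hc : PySem.Set.contains s x = false := by
        simp [PySem.Set.contains, hx]
      have hadd : PySem.Set.add s x = s ++ [x] := by
        simp [PySem.Set.add, hx]
      simp only [hc, Bool.false_eq_true, if_false, hadd]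
      rw [ih (s ++ [x])]
      simp only [pvDed, if_neg hx, List.filter_cons]
      rw [pvDed_snoc_seen, List.Nodup.erase_eq_filter (pvNodup_ded r s) x]
      cases hseen : PySem.Set.contains seen0 x
      · simp
      · simp

-- B's stack loop, started with seen = stack, is A's stack loop twice over
theorem pvStackFold (l : List String) (key : PySem.Dict Int (List String)) :
    ∀ (st : List String),
    l.foldl
      (fun (u : List String × PySem.Set String × PySem.Dict Int (List String)) x =>
        if PySem.Set.contains u.2.1 x then u
        else (u.1 ++ [x], PySem.Set.add u.2.1 x, u.2.2))
      (st, st, key)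
    = (pvStF l st, pvStF l st, key) := by
  induction l with
  | nil => intro st; simp [pvStF]
  | cons x r ih =>
    intro st
    rw [List.foldl_cons]
    have hstf : pvStF (x :: r) st = pvStF r (if x ∈ st then st else st ++ [x]) := by
      simp only [pvStF, List.foldl_cons]
    by_cases hx : x ∈ st
    · have hc : PySem.Set.contains st x = true := by
        simp [PySem.Set.contains, hx]
      simp only [hc, if_true]
      rw [ih st, hstf, if_pos hx]
    · have hc : PySem.Set.contains st x = false := by
        simp [PySem.Set.contains, hx]
      have hadd : PySem.Set.add st x = st ++ [x] := by
        simp [PySem.Set.add, hx]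
      simp only [hc, Bool.false_eq_true, if_false, hadd]
      rw [ih (st ++ [x]), hstf, if_neg hx]

-- the outer loops agree, layer by layer
theorem pvOuter (d : PySem.Dict Int (List String)) (max_idx : Int) (range : List Int) :
    ∀ (st : List String) (seen : PySem.Set String) (d0 : PySem.Dict Int (List String)),
    seen = st →
    range.foldl
      (fun (s : List String × PySem.Set String × PySem.Dict Int (List String)) idx =>
        match d.get? idx with
        | some layer =>
          layer.foldl
            (fun (u : List String × PySem.Set String × PySem.Dict Int (List String)) x =>
              if PySem.Set.contains u.2.1 x then u
              else (u.1 ++ [x], PySem.Set.add u.2.1 x, u.2.2))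
            (s.1, s.2.1, s.2.2.insert (max_idx - idx)
              ((layer.reverse.foldl
                (fun (t : PySem.Set String × List String) x =>
                  if PySem.Set.contains t.1 x then t
                  else (PySem.Set.add t.1 x,
                        if PySem.Set.contains s.2.1 x then t.2 else t.2 ++ [x]))
                (PySem.Set.empty, [])).2.reverse))
        | none => s)
      (st, seen, d0)
    = ((range.foldl
        (fun (s : List String × PySem.Dict Int (List String)) list_idx =>
          match d.get? list_idx with
          | some vals =>
            vals.foldl
              (fun (t : List String × PySem.Dict Int (List String)) obj =>
                if obj ∈ t.1 then
                  (t.1, t.2.modify (max_idx - list_idx) []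
                    (fun l => (PySem.List.remove? l obj).getD l))
                else (t.1 ++ [obj], t.2))
              (s.1, s.2.insert (max_idx - list_idx) vals)
          | none => s)
        (st, d0)).1,
       (range.foldl
        (fun (s : List String × PySem.Dict Int (List String)) list_idx =>
          match d.get? list_idx with
          | some vals =>
            vals.foldl
              (fun (t : List String × PySem.Dict Int (List String)) obj =>
                if obj ∈ t.1 then
                  (t.1, t.2.modify (max_idx - list_idx) []
                    (fun l => (PySem.List.remove? l obj).getD l))
                else (t.1 ++ [obj], t.2))
              (s.1, s.2.insert (max_idx - list_idx) vals)
          | none => s)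
        (st, d0)).1,
       (range.foldl
        (fun (s : List String × PySem.Dict Int (List String)) list_idx =>
          match d.get? list_idx with
          | some vals =>
            vals.foldl
              (fun (t : List String × PySem.Dict Int (List String)) obj =>
                if obj ∈ t.1 then
                  (t.1, t.2.modify (max_idx - list_idx) []
                    (fun l => (PySem.List.remove? l obj).getD l))
                else (t.1 ++ [obj], t.2))
              (s.1, s.2.insert (max_idx - list_idx) vals)
          | none => s)
        (st, d0)).2) := by
  induction range with
  | nil => intro st seen d0 h; subst h; rfl
  | cons idx rest ih =>
    intro st seen d0 h
    subst h
    rw [List.foldl_cons, List.foldl_cons]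
    cases hidx : d.get? idx with
    | none =>
      exact ih seen seen d0 rfl
    | some layer =>
      simp only []
      have hA := pvPairFold_spec layer seen seen [] List.nodup_nil (by simp) (fun x h => h)
      rw [List.nil_append] at hA
      have hkept : layer.foldl (fun c x => if x ∈ seen then c else c.erase x ++ [x]) []
          = ((pvDed [] layer.reverse).filter (fun x => !PySem.Set.contains seen x)).reverse :=
        pvR_spec seen layer
      rw [pvDictFold layer (max_idx - idx) d0 seen layer, hA]
      rw [pvRevSweep seen layer.reverse PySem.Set.empty []]
      rw [List.nil_append]
      rw [show (PySem.Set.empty : PySem.Set String) = ([] : List String) from rfl]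
      rw [← hkept]
      rw [pvStackFold layer _ seen]
      exact ih (pvStF layer seen) (pvStF layer seen) _ rfl

-- ===== VERDICT (by name: the statement is the Claim_ definition above) =====
theorem process_dependency_lists_py_spec : Claim_equal_process_dependency_lists_py := by
  intro lists _
  unfold Spec_process_dependency_lists_py
  simp only [process_dependency_lists_py, process_dependency_lists_py_alt]
  rw [pvOuter _ _ _ [] PySem.Set.empty PySem.Dict.empty rfl]
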